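-- pv_equiv track=rewrite | github.com/gabi-a/blasting_preconceptions | Parse/stats_gen/crysSolutionsXml_func.py | strip_nulls
-- ===== SOURCE A (Python) =====
-- def strip_nulls(list):
-- 	temp = []
-- 	nulls = 0
-- 	for n in list:
-- 		if n != None:
-- 			temp.append(n)
-- 		else:
-- 			nulls+=1
-- 	return temp,nulls
-- ===== SOURCE B (Python) =====
-- def strip_nulls(list):
-- 	if len(list) <= 1:
-- 		if len(list) == 1 and list[0] != None:
-- 			return [list[0]], 0
-- 		return [], len(list)
-- 	mid = len(list) // 2
-- 	lt, ln = strip_nulls(list[:mid])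
-- 	rt, rn = strip_nulls(list[mid:])
-- 	return lt + rt, ln + rn
-- ===== Notes on version B (the rewrite author's own statement) =====
-- stated objective: alternative
-- what changed: Replaces the single accumulating loop by a divide-and-conquer recursion: split the list in half, strip each half recursively, then concatenate the filtered halves and add the null counts; only the length-1 base case tests against None.
import Mathlib
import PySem

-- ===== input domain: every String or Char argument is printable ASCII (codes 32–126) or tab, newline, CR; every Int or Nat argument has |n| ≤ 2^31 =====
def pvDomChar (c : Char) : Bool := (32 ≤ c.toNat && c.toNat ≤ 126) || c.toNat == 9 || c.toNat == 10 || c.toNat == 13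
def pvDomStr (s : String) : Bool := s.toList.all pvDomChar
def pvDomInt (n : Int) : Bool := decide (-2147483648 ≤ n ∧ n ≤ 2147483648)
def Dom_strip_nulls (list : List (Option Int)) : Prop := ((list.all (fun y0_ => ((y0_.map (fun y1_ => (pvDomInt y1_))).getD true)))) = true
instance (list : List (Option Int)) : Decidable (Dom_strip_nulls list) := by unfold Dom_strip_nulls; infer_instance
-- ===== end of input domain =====

-- B replaces A's single accumulating loop by a divide-and-conquer recursion (alternative decomposition; return value only).

-- ===== PORT A =====
-- literal port: fold over the list with state (temp, nulls), appending or incrementing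
def strip_nulls (list : List (Option Int)) : List Int × Int :=
  list.foldl
    (fun (st : List Int × Int) n =>
      match n with
      | some v => (st.1 ++ [v], st.2)
      | none => (st.1, st.2 + 1))
    ([], 0)

-- ===== PORT B =====
-- divide and conquer: base cases for length ≤ 1, otherwise split at mid = len // 2,
-- recurse on the halves and combine.  list[:mid] / list[mid:] are exactly
-- List.take mid / List.drop mid for a natural in-range mid (PySem.List.slice_to_natCast / slice_from_natCast).
def strip_nulls_alt (list : List (Option Int)) : List Int × Int :=
  if h : list.length ≤ 1 then
    match list with
    | [some v] => ([v], 0)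
    | l => (([] : List Int), (l.length : Int))
  else
    let mid := list.length / 2
    let l := strip_nulls_alt (list.take mid)
    let r := strip_nulls_alt (list.drop mid)
    (l.1 ++ r.1, l.2 + r.2)
termination_by list.length
decreasing_by
  · simp; omega
  · simp; omega

-- ===== PRECONDITION & SPEC =====
def Spec_strip_nulls (list : List (Option Int)) (out : List Int × Int) : Prop := out = strip_nulls_alt list
instance (list : List (Option Int)) (out : List Int × Int) : Decidable (Spec_strip_nulls list out) := by unfold Spec_strip_nulls; infer_instance

-- ===== CLAIM (what is proved, stated in full; the proofs are below) =====
def Claim_equal_strip_nulls : Prop := ∀ (list : List (Option Int)), Dom_strip_nulls list → Spec_strip_nulls list (strip_nulls list)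

-- ===== LEMMAS AND PROOFS =====
theorem strip_nulls_foldl_inv (l : List (Option Int)) (t : List Int) (c : Int) :
    l.foldl
      (fun (st : List Int × Int) n =>
        match n with
        | some v => (st.1 ++ [v], st.2)
        | none => (st.1, st.2 + 1))
      (t, c)
    = (t ++ l.filterMap id, c + ((l.length : Int) - (l.filterMap id).length)) := by
  induction l generalizing t c with
  | nil => simp
  | cons h tl ih =>
    cases h with
    | some v => simp [List.foldl, ih, List.filterMap]
    | none => simp [List.foldl, ih]; ring

theorem strip_nulls_alt_closed (l : List (Option Int)) :
    strip_nulls_alt l = (l.filterMap id, (l.length : Int) - ((l.filterMap id).length : Int)) := by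
  induction hn : l.length using Nat.strong_induction_on generalizing l with
  | _ n ih =>
    subst hn
    rw [strip_nulls_alt]
    by_cases h : l.length ≤ 1
    · simp only [dif_pos h]
      match l with
      | [] => simp
      | [some v] => simp
      | [none] => simp
      | a :: b :: t => simp at h
    · simp only [dif_neg h]
      have hmid : l.length / 2 ≤ l.length := by omega
      have h1 := ih (l.take (l.length / 2)).length
        (by simp [Nat.min_eq_left hmid]; omega) (l.take (l.length / 2)) rfl
      have h2 := ih (l.drop (l.length / 2)).length
        (by simp; omega) (l.drop (l.length / 2)) rfl
      show (_ ++ _, _ + _) = _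
      rw [h1, h2]
      have hsplit : l.filterMap id
          = (l.take (l.length / 2)).filterMap id ++ (l.drop (l.length / 2)).filterMap id := by
        rw [← List.filterMap_append, List.take_append_drop]
      rw [Prod.mk.injEq]
      refine ⟨hsplit.symm, ?_⟩
      rw [hsplit]
      simp [Nat.min_eq_left hmid]
      omega

-- ===== VERDICT (by name: the statement is the Claim_ definition above) =====
theorem strip_nulls_spec : Claim_equal_strip_nulls := by
  intro l _
  show _ = _
  simp [strip_nulls, strip_nulls_alt_closed, strip_nulls_foldl_inv]
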